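-- pv_equiv track=rewrite | github.com/JhengXu/reproduce-neuron-mbzuai | neuron.py | convertNeuronsToDict
-- ===== SOURCE A (Python) =====
-- def convertNeuronsToDict(neurons):
--     layer2neurons = {}
--     for fn in neurons:
--         i, j = fn
--         if i not in layer2neurons:
--             layer2neurons[i] = []
--         layer2neurons[i].append(j)
--     return layer2neurons
-- ===== SOURCE B (Python) =====
-- def convertNeuronsToDict(neurons):
--     # index-then-nested-scan: distinct layers in first-appearance order,
--     # then one scan of the materialized list per distinct layer
--     items = [(i, j) for i, j in neurons]
--     keys = list(dict.fromkeys(i for i, j in items))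
--     return {i: [j for a, j in items if a == i] for i in keys}
-- ===== Notes on version B (the rewrite author's own statement) =====
-- stated objective: alternative
-- what changed: Replaces the single-pass dict-accumulator loop by computing the ordered distinct layers first and then building each group with a separate filtering scan of the list.
import Mathlib
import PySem

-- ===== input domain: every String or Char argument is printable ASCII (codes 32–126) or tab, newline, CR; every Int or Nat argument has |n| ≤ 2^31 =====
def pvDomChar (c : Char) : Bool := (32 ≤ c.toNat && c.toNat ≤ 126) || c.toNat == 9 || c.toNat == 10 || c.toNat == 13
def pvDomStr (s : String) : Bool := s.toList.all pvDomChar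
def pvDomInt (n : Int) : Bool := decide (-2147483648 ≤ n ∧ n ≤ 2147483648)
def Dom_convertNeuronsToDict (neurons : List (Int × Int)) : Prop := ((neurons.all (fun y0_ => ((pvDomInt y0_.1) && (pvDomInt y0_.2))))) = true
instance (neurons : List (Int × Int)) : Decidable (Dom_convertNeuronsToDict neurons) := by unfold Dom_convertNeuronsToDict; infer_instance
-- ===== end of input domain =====

-- B groups by scanning the list once per distinct layer instead of A's single-pass dict accumulation; alternative decomposition, same return value.

-- ===== PORT A =====
-- loop body: if i not in d: d[i] = []; d[i].append(j)
def convertNeuronsToDictStep (d : PySem.Dict Int (List Int)) (p : Int × Int) : PySem.Dict Int (List Int) :=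
  let d' := if d.contains p.1 then d else d.insert p.1 []
  d'.insert p.1 (d'.getD p.1 [] ++ [p.2])

def convertNeuronsToDict (neurons : List (Int × Int)) : List (Int × List Int) :=
  (neurons.foldl convertNeuronsToDictStep PySem.Dict.empty).items

-- ===== PORT B =====
def convertNeuronsToDict_alt (neurons : List (Int × Int)) : List (Int × List Int) :=
  let items := neurons.map (fun p => (p.1, p.2))
  let keys := PySem.List.dedup (items.map (·.1))
  keys.map (fun i => (i, (items.filter (fun p => p.1 == i)).map (·.2)))

-- ===== PRECONDITION & SPEC =====
def Spec_convertNeuronsToDict (neurons : List (Int × Int)) (out : List (Int × List Int)) : Prop := out = convertNeuronsToDict_alt neurons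
instance (neurons : List (Int × Int)) (out : List (Int × List Int)) : Decidable (Spec_convertNeuronsToDict neurons out) := by unfold Spec_convertNeuronsToDict; infer_instance

-- ===== CLAIM (what is proved, stated in full; the proofs are below) =====
def Claim_equal_convertNeuronsToDict : Prop := ∀ (neurons : List (Int × Int)), Dom_convertNeuronsToDict neurons → Spec_convertNeuronsToDict neurons (convertNeuronsToDict neurons)

-- ===== LEMMAS AND PROOFS =====

-- A's guarded insert-then-append step is the modify-with-default step
theorem step_eq_modify (d : PySem.Dict Int (List Int)) (p : Int × Int) :
    convertNeuronsToDictStep d p = d.modify p.1 [] (· ++ [p.2]) := by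
  unfold convertNeuronsToDictStep PySem.Dict.modify
  by_cases h : d.contains p.1
  · simp [h]
  · simp [h, PySem.Dict.insert_insert_self, PySem.Dict.getD_of_not_contains]

theorem convertNeuronsToDict_spec' (neurons : List (Int × Int)) :
    convertNeuronsToDict neurons = convertNeuronsToDict_alt neurons := by
  unfold convertNeuronsToDict convertNeuronsToDict_alt
  have hstep : neurons.foldl convertNeuronsToDictStep PySem.Dict.empty
      = neurons.foldl (fun d p => d.modify p.1 [] (· ++ [p.2])) PySem.Dict.empty := by
    congr 1
    funext d p
    exact step_eq_modify d p
  rw [hstep]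
  have hnd : (neurons.foldl (fun d p => d.modify p.1 [] (· ++ [p.2])) PySem.Dict.empty).keys.Nodup := by
    exact PySem.Dict.nodup_keys_foldl_modify_key neurons (·.1) [] (fun _ p => (· ++ [p.2])) _
      (by simp [PySem.Dict.keys_empty])
  rw [PySem.Dict.items_eq_map_keys _ hnd []]
  have hkeys : (neurons.foldl (fun d p => d.modify p.1 [] (· ++ [p.2])) PySem.Dict.empty).keys
      = PySem.List.dedup (neurons.map (·.1)) := by
    rw [PySem.Dict.keys_foldl_modify_key]
    simp [PySem.Dict.keys_empty, PySem.Set.update, PySem.List.dedup_eq_ofList, PySem.Set.ofList]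
  rw [hkeys]
  simp only [List.map_map, Function.comp_def]
  apply List.map_congr_left
  intro k _
  rw [PySem.Dict.getD_foldl_modify_append]
  simp [PySem.Dict.getD_empty]

-- ===== VERDICT (by name: the statement is the Claim_ definition above) =====
theorem convertNeuronsToDict_spec : Claim_equal_convertNeuronsToDict := by
  intro neurons _
  unfold Spec_convertNeuronsToDict
  exact convertNeuronsToDict_spec' neurons
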